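-- pv_equiv track=rewrite | github.com/PSU-Security-Universe/sqlright | MySQL/scripts/translate.py | join_comments_into_oneline
-- ===== SOURCE A (Python) =====
-- def join_comments_into_oneline(text):
--     clean_text = text
--
--     index = 0
--     inside_comment = False
--     while index < len(text) - 1:
--         lch = text[index]
--         rch = text[index + 1]
--         if lch == "/" and rch == "*":
--             inside_comment = True
--         elif lch == "*" and rch == "/":
--             inside_comment = False
--
--         if lch == "\n" and inside_comment:
--             clean_text = clean_text[:index] + " " + clean_text[index + 1 :]
--
--         index += 1
--
--     return clean_text.strip()
-- ===== SOURCE B (Python) =====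
-- def join_comments_into_oneline(text):
--     # Index every comment delimiter up front, then make one pass over the
--     # characters: a newline is inside a comment exactly when the most recent
--     # delimiter at or before it is an opener "/*".
--     marks = []
--     for pat in ("/*", "*/"):
--         i = text.find(pat)
--         while i != -1:
--             marks.append((i, pat == "/*"))
--             i = text.find(pat, i + 1)
--     marks.sort(key=lambda m: m[0])
--
--     chars = list(text)
--     m = 0
--     inside = False
--     for k, c in enumerate(chars):
--         while m < len(marks) and marks[m][0] <= k:
--             inside = marks[m][1]
--             m += 1
--         if c == "\n" and inside:
--             chars[k] = " "
--     return "".join(chars).strip()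
-- ===== Notes on version B (the rewrite author's own statement) =====
-- stated objective: faster
-- what changed: Instead of A's index-by-index pair state machine that rebuilds the whole string with a slice splice for every newline it blanks, B first indexes every comment-delimiter occurrence (openers and closers) with str.find scans, sorts them, and then does one merge pass over the characters, replacing a newline exactly when the most recent delimiter at or before it is an opener.
import Mathlib
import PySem

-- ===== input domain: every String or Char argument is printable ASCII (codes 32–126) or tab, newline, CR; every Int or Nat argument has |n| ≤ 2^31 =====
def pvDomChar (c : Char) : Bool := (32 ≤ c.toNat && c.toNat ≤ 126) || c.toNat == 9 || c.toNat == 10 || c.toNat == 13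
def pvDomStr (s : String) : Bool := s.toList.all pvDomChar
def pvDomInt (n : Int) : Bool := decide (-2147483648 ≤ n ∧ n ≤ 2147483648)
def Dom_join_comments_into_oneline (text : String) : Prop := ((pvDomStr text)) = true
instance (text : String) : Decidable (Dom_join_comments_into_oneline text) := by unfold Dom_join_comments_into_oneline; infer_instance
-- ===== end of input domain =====

-- B indexes all '/*' and '*/' delimiter occurrences first, sorts them, and blanks each newline
-- whose most recent delimiter is an opener, in one merge pass; same return value as A.

-- ===== PORT A =====
-- while index < len(text)-1: read text[index], text[index+1], toggle inside_comment,
-- splice clean_text[:index] + " " + clean_text[index+1:] on a newline inside a comment.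
def loopA (tl : List Char) (clean : List Char) (inside : Bool) (index : Nat) : List Char :=
  if index < tl.length - 1 then
    let lch := tl.getD index ' '      -- in range: guard gives index < len(tl)
    let rch := tl.getD (index + 1) ' '
    let inside' := if lch = '/' ∧ rch = '*' then true
                   else if lch = '*' ∧ rch = '/' then false else inside
    let clean' := if lch = '\n' ∧ inside' then
        PySem.List.slice clean none (some (index : Int)) ++ [' ']
          ++ PySem.List.slice clean (some ((index : Int) + 1)) none
      else clean
    loopA tl clean' inside' (index + 1)
  else clean
termination_by tl.length - 1 - index

def join_comments_into_oneline (text : String) : String :=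
  String.ofList (PySem.Chars.strip (loopA text.toList text.toList false 0))

-- ===== PORT B =====
-- i = text.find(pat); while i != -1: marks.append((i, pat == "/*")); i = text.find(pat, i+1)
-- (unfolding equation for occLoop is occLoop_succ, below the claim block)
-- (fuel = length+1 only totalizes the while loop: each found index is ≥ the search start)
def occLoop (tl pat : List Char) : Nat → Int → List Nat
  | 0, _ => []
  | fuel + 1, start =>
    let i := PySem.Chars.findFrom tl pat start
    if i = -1 then [] else i.toNat :: occLoop tl pat fuel (i + 1)

-- marks for both patterns, then marks.sort(key=lambda m: m[0])
def marksOf (tl : List Char) : List (Nat × Bool) :=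
  PySem.List.sorted
    ((occLoop tl ['/', '*'] (tl.length + 1) 0).map (fun i => (i, true))
      ++ (occLoop tl ['*', '/'] (tl.length + 1) 0).map (fun i => (i, false)))
    (fun m => m.1) false

-- the inner while: consume the marks at index ≤ k, updating inside
def consume (ms : List (Nat × Bool)) (ins : Bool) (k : Nat) : List (Nat × Bool) × Bool :=
  match ms with
  | [] => ([], ins)
  | (i, v) :: t => if i ≤ k then consume t v k else ((i, v) :: t, ins)

-- the for k, c in enumerate(chars) loop; chars[k] = " " becomes emitting the char
def emit (ms : List (Nat × Bool)) (ins : Bool) (k : Nat) : List Char → List Char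
  | [] => []
  | c :: rest =>
    let p := consume ms ins k
    (if c = '\n' ∧ p.2 then ' ' else c) :: emit p.1 p.2 (k + 1) rest

def join_comments_into_oneline_alt (text : String) : String :=
  String.ofList (PySem.Chars.strip (emit (marksOf text.toList) false 0 text.toList))

-- ===== PRECONDITION & SPEC =====
def Spec_join_comments_into_oneline (text : String) (out : String) : Prop := out = join_comments_into_oneline_alt text
instance (text : String) (out : String) : Decidable (Spec_join_comments_into_oneline text out) := by unfold Spec_join_comments_into_oneline; infer_instance

-- ===== CLAIM (what is proved, stated in full; the proofs are below) =====
def Claim_equal_join_comments_into_oneline : Prop := ∀ (text : String), Dom_join_comments_into_oneline text → Spec_join_comments_into_oneline text (join_comments_into_oneline text)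

-- ===== LEMMAS AND PROOFS =====

-- reference semantics of A's state machine: pairwise toggle, the last char is never touched
def scan : Bool → List Char → List Char
  | _, [] => []
  | _, [a] => [a]
  | ins, a :: b :: t =>
    let ins' := if a = '/' ∧ b = '*' then true
                else if a = '*' ∧ b = '/' then false else ins
    (if a = '\n' ∧ ins' then ' ' else a) :: scan ins' (b :: t)

-- the delimiter (if any) whose pair starts at index k
def delimAt (tl : List Char) (k : Nat) : Option Bool :=
  if ['/', '*'] <+: tl.drop k then some true
  else if ['*', '/'] <+: tl.drop k then some false
  else none

-- "equal, or differ only in a trailing ' ' vs '\n'" (B also blanks a newline in final position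
-- when a comment is open there; A never examines the last char; strip erases both)
def Rws (x y : List Char) : Prop := x = y ∨ ∃ z, x = z ++ [' '] ∧ y = z ++ ['\n']

lemma Rws_refl (x : List Char) : Rws x x := Or.inl rfl

lemma Rws_append_left (z : List Char) {x y : List Char} (h : Rws x y) : Rws (z ++ x) (z ++ y) := by
  rcases h with rfl | ⟨w, rfl, rfl⟩
  · exact Or.inl rfl
  · exact Or.inr ⟨z ++ w, by simp, by simp⟩

lemma strip_Rws {x y : List Char} (h : Rws x y) : PySem.Chars.strip x = PySem.Chars.strip y := by
  rcases h with rfl | ⟨w, rfl, rfl⟩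
  · rfl
  · unfold PySem.Chars.strip PySem.Chars.lstrip PySem.Chars.rstrip
    rw [List.dropWhile_append, List.dropWhile_append]
    have hsp : PySem.Chars.isspace ' ' = true := by decide
    have hnl : PySem.Chars.isspace '\n' = true := by decide
    by_cases he : (List.dropWhile PySem.Chars.isspace w).isEmpty
    · simp [he, List.dropWhile, hsp, hnl]
    · simp only [he, if_neg, Bool.false_eq_true, not_false_iff]
      rw [List.reverse_append, List.reverse_append]
      simp [hsp, hnl]

lemma infix_iff_drop (l₁ l₂ : List Char) : l₁ <:+: l₂ ↔ ∃ n, l₁ <+: l₂.drop n := by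
  constructor
  · rintro ⟨s, t, rfl⟩
    exact ⟨s.length, by simp⟩
  · rintro ⟨n, h⟩
    exact List.infix_iff_prefix_suffix.2 ⟨l₂.drop n, h, List.drop_suffix n l₂⟩

lemma prefix_drop_infix (tl pat : List Char) (s j : Nat) (hsj : s ≤ j)
    (h : pat <+: tl.drop j) : pat <:+: tl.drop s := by
  rw [infix_iff_drop]
  refine ⟨j - s, ?_⟩
  rw [List.drop_drop]
  rw [show s + (j - s) = j by omega]
  exact h

-- A's loop: splice-in-place equals emit-as-you-go (scan)
lemma loopA_eq : ∀ (suf done : List Char) (tl : List Char) (inside : Bool),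
    tl.drop done.length = suf → done.length + suf.length = tl.length →
    loopA tl (done ++ suf) inside done.length = done ++ scan inside suf := by
  intro suf
  induction suf with
  | nil =>
    intro done tl inside hdrop hlen
    rw [loopA, if_neg (by simp at hlen; omega)]
    simp [scan]
  | cons a t ih =>
    intro done tl inside hdrop hlen
    match t, ih with
    | [], _ =>
      rw [loopA, if_neg (by simp at hlen; omega)]
      simp [scan]
    | b :: t', ih =>
      have hlt : done.length < tl.length - 1 := by simp at hlen; omega
      have ha : tl.getD done.length ' ' = a := by
        rw [List.getD_eq_getElem?_getD]
        rw [show tl[done.length]? = (tl.drop done.length)[0]? by rw [List.getElem?_drop, Nat.add_zero]]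
        rw [hdrop]; rfl
      have hb : tl.getD (done.length + 1) ' ' = b := by
        rw [List.getD_eq_getElem?_getD]
        rw [show tl[done.length + 1]? = (tl.drop done.length)[1]? by rw [List.getElem?_drop]]
        rw [hdrop]; rfl
      rw [loopA, if_pos hlt]
      simp only [ha, hb]
      set ins' := if a = '/' ∧ b = '*' then true else if a = '*' ∧ b = '/' then false else inside with hins
      set out := if a = '\n' ∧ ins' then ' ' else a with hout
      have hslice1 : PySem.List.slice (done ++ a :: b :: t') none (some ((done.length : Nat) : Int)) = done := by
        rw [PySem.List.slice_to_natCast, List.take_left]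
      have hslice2 : PySem.List.slice (done ++ a :: b :: t') (some (((done.length : Nat) : Int) + 1)) none = b :: t' := by
        rw [show ((done.length : Nat) : Int) + 1 = ((done.length + 1 : Nat) : Int) by push_cast; ring]
        rw [PySem.List.slice_from_natCast]
        rw [show done ++ a :: b :: t' = (done ++ [a]) ++ (b :: t') by simp]
        rw [show done.length + 1 = (done ++ [a]).length by simp]
        rw [List.drop_left]
      have hclean : (if a = '\n' ∧ ins' then
          PySem.List.slice (done ++ a :: b :: t') none (some ((done.length : Nat) : Int)) ++ [' ']
            ++ PySem.List.slice (done ++ a :: b :: t') (some (((done.length : Nat) : Int) + 1)) none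
          else done ++ a :: b :: t') = (done ++ [out]) ++ (b :: t') := by
        by_cases hc : a = '\n' ∧ ins'
        · rw [if_pos hc, hslice1, hslice2, hout, if_pos hc]
        · rw [if_neg hc, hout, if_neg hc, List.append_assoc, List.singleton_append]
      rw [hclean]
      have hrec := ih (done ++ [out]) tl ins'
        (by rw [show (done ++ [out]).length = done.length + 1 by simp]
            rw [← List.tail_drop, hdrop]; rfl)
        (by simp at hlen ⊢; omega)
      rw [show (done ++ [out]).length = done.length + 1 by simp] at hrec
      rw [hrec]
      have : scan inside (a :: b :: t') = out :: scan ins' (b :: t') := by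
        simp only [scan]
        rw [← hins, ← hout]
      rw [this]
      simp

lemma occLoop_succ (tl pat : List Char) (fuel : Nat) (start : Int) :
    occLoop tl pat (fuel + 1) start =
      if PySem.Chars.findFrom tl pat start = -1 then []
      else (PySem.Chars.findFrom tl pat start).toNat
        :: occLoop tl pat fuel (PySem.Chars.findFrom tl pat start + 1) := rfl

-- occLoop collects exactly the pattern occurrences at indices ≥ s, strictly increasing
lemma occLoop_spec (tl pat : List Char) (hpat : pat ≠ []) :
    ∀ (fuel s : Nat), s ≤ tl.length → tl.length + 1 ≤ fuel + s →
      (∀ j, j ∈ occLoop tl pat fuel ((s : Nat) : Int) ↔ s ≤ j ∧ pat <+: tl.drop j)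
      ∧ (occLoop tl pat fuel ((s : Nat) : Int)).Pairwise (· < ·) := by
  intro fuel
  induction fuel with
  | zero =>
    intro s hs hf
    exact absurd hf (by omega)
  | succ fuel ih =>
    intro s hs hf
    by_cases hF : PySem.Chars.findFrom tl pat ((s : Nat) : Int) = -1
    · have hninf : ¬ pat <:+: tl.drop s :=
        (PySem.Chars.findFrom_natCast_eq_neg_one_iff tl pat s hs).1 hF
      constructor
      · intro j
        rw [occLoop_succ, if_pos hF]
        simp only [List.not_mem_nil, false_iff]
        rintro ⟨hj, hp⟩
        exact hninf (prefix_drop_infix tl pat s j hj hp)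
      · rw [occLoop_succ, if_pos hF]
        exact List.Pairwise.nil
    · obtain ⟨hge, hpre, hmin⟩ := PySem.Chars.findFrom_natCast_spec tl pat s hs hF
      have hF0 : 0 ≤ PySem.Chars.findFrom tl pat ((s : Nat) : Int) :=
        le_trans (Int.natCast_nonneg _) hge
      set iN := (PySem.Chars.findFrom tl pat ((s : Nat) : Int)).toNat with hiNdef
      have hsiN : s ≤ iN := by
        have := hge; omega
      have hiNlt : iN < tl.length := by
        obtain ⟨t, ht⟩ := hpre
        have hne : tl.drop iN ≠ [] := by
          rw [← ht]
          cases pat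
          · exact absurd rfl hpat
          · simp
        rw [ne_eq, List.drop_eq_nil_iff] at hne
        omega
      have hcast : PySem.Chars.findFrom tl pat ((s : Nat) : Int) + 1 = ((iN + 1 : Nat) : Int) := by
        rw [show PySem.Chars.findFrom tl pat ((s : Nat) : Int) = (iN : Int) by
          rw [hiNdef, Int.toNat_of_nonneg hF0]]
        push_cast; ring
      have hFiN : (PySem.Chars.findFrom tl pat ((s : Nat) : Int)).toNat = iN := hiNdef.symm
      clear_value iN
      obtain ⟨ihm, ihp⟩ := ih (iN + 1) (by omega) (by omega)
      constructor
      · intro j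
        rw [occLoop_succ, if_neg hF, hcast, hFiN]
        simp only [List.mem_cons, ihm]
        constructor
        · rintro (rfl | ⟨hj, hp⟩)
          · exact ⟨hsiN, hpre⟩
          · exact ⟨by omega, hp⟩
        · rintro ⟨hj, hp⟩
          rcases Nat.lt_or_ge j (iN + 1) with hlt | hgt
          · left
            by_contra hne
            exact hmin j hj (by omega) hp
          · exact Or.inr ⟨hgt, hp⟩
      · rw [occLoop_succ, if_neg hF, hcast, hFiN]
        refine List.pairwise_cons.2 ⟨?_, ihp⟩
        intro j hj
        have := (ihm j).1 hj
        omega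

lemma not_open_close (tl : List Char) (i : Nat) :
    ¬ (['/', '*'] <+: tl.drop i ∧ ['*', '/'] <+: tl.drop i) := by
  rintro ⟨⟨t1, h1⟩, ⟨t2, h2⟩⟩
  rw [← h1] at h2
  simp at h2

lemma marksOf_mem (tl : List Char) (i : Nat) (v : Bool) :
    (i, v) ∈ marksOf tl ↔ delimAt tl i = some v := by
  have hiff := occLoop_spec tl ['/', '*'] (by simp) (tl.length + 1) 0 (by omega) (by omega)
  have hiff2 := occLoop_spec tl ['*', '/'] (by simp) (tl.length + 1) 0 (by omega) (by omega)
  rw [marksOf, PySem.List.mem_sorted]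
  simp only [List.mem_append, List.mem_map]
  constructor
  · rintro (⟨j, hj, hjv⟩ | ⟨j, hj, hjv⟩)
    · obtain ⟨rfl, rfl⟩ : j = i ∧ true = v := by
        constructor <;> [exact congrArg Prod.fst hjv; exact congrArg Prod.snd hjv]
      have := ((hiff.1 j).1 hj).2
      rw [delimAt, if_pos this]
    · obtain ⟨rfl, rfl⟩ : j = i ∧ false = v := by
        constructor <;> [exact congrArg Prod.fst hjv; exact congrArg Prod.snd hjv]
      have hcl := ((hiff2.1 j).1 hj).2
      have hno : ¬ ['/', '*'] <+: tl.drop j := fun ho => not_open_close tl j ⟨ho, hcl⟩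
      rw [delimAt, if_neg hno, if_pos hcl]
  · intro hd
    rw [delimAt] at hd
    split_ifs at hd with h1 h2
    · obtain rfl : true = v := Option.some.inj hd
      exact Or.inl ⟨i, (hiff.1 i).2 ⟨by omega, h1⟩, rfl⟩
    · obtain rfl : false = v := Option.some.inj hd
      exact Or.inr ⟨i, (hiff2.1 i).2 ⟨by omega, h2⟩, rfl⟩

lemma marksOf_sorted (tl : List Char) : (marksOf tl).Pairwise (fun a b => a.1 < b.1) := by
  have hle : (marksOf tl).Pairwise (fun a b => a.1 ≤ b.1) := by
    have := PySem.List.sorted_pairwise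
      ((occLoop tl ['/', '*'] (tl.length + 1) 0).map (fun i => (i, true))
        ++ (occLoop tl ['*', '/'] (tl.length + 1) 0).map (fun i => (i, false)))
      (fun m : Nat × Bool => m.1)
    exact this
  have hiff := occLoop_spec tl ['/', '*'] (by simp) (tl.length + 1) 0 (by omega) (by omega)
  have hiff2 := occLoop_spec tl ['*', '/'] (by simp) (tl.length + 1) 0 (by omega) (by omega)
  have hnodup : ((marksOf tl).map Prod.fst).Nodup := by
    have hperm : (marksOf tl).Perm
        ((occLoop tl ['/', '*'] (tl.length + 1) 0).map (fun i => (i, true))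
          ++ (occLoop tl ['*', '/'] (tl.length + 1) 0).map (fun i => (i, false))) :=
      PySem.List.sorted_perm _ _ _
    have hmapperm := hperm.map Prod.fst
    rw [List.Perm.nodup_iff hmapperm]
    have hsimp : (((occLoop tl ['/', '*'] (tl.length + 1) 0).map (fun i => (i, true))
        ++ (occLoop tl ['*', '/'] (tl.length + 1) 0).map (fun i => (i, false))).map Prod.fst)
        = occLoop tl ['/', '*'] (tl.length + 1) 0 ++ occLoop tl ['*', '/'] (tl.length + 1) 0 := by
      simp [List.map_map, Function.comp_def]
    rw [hsimp]
    rw [List.nodup_append]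
    refine ⟨hiff.2.imp (fun h => Nat.ne_of_lt h), hiff2.2.imp (fun h => Nat.ne_of_lt h), ?_⟩
    intro j hj j' hj' rfl
    exact not_open_close tl j ⟨((hiff.1 j).1 hj).2, ((hiff2.1 j).1 hj').2⟩
  have hne : (marksOf tl).Pairwise (fun a b => a.1 ≠ b.1) := by
    exact List.pairwise_map.1 hnodup
  exact (hle.and hne).imp (fun h => lt_of_le_of_ne h.1 h.2)

lemma consume_of_gt (t : List (Nat × Bool)) (ins : Bool) (k : Nat)
    (h : ∀ m ∈ t, k < m.1) : consume t ins k = (t, ins) := by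
  cases t with
  | nil => rfl
  | cons m t' =>
    obtain ⟨i, v⟩ := m
    rw [consume, if_neg (by have := h (i, v) (by simp); simp at this ⊢; omega)]

lemma prefix2_iff (a b : Char) (t : List Char) (x y : Char) :
    ([x, y] <+: a :: b :: t) ↔ (a = x ∧ b = y) := by
  constructor
  · rintro ⟨t', ht'⟩
    simp only [List.cons_append, List.nil_append, List.cons.injEq] at ht'
    exact ⟨ht'.1.symm, ht'.2.1.symm⟩
  · rintro ⟨rfl, rfl⟩
    exact ⟨t, rfl⟩

lemma Rws_cons (c : Char) {x y : List Char} (h : Rws x y) : Rws (c :: x) (c :: y) := by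
  have := Rws_append_left [c] h
  simpa using this

-- B's merge pass equals A's state machine (up to a blanked newline in final position)
lemma emit_eq_scan (tl : List Char) : ∀ (u : List Char) (ms : List (Nat × Bool)) (ins : Bool) (k : Nat),
    u = tl.drop k →
    ms.Pairwise (fun a b => a.1 < b.1) →
    (∀ m ∈ ms, k ≤ m.1) →
    (∀ i v, k ≤ i → ((i, v) ∈ ms ↔ delimAt tl i = some v)) →
    Rws (emit ms ins k u) (scan ins u) := by
  intro u
  induction u with
  | nil => intro ms ins k _ _ _ _; exact Rws_refl []
  | cons a rest ih =>
    intro ms ins k hdrop hsort hge hmem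
    -- the consume step: new marks and state
    have hstep : ∃ ms' , consume ms ins k = (ms', (delimAt tl k).getD ins)
        ∧ ms'.Pairwise (fun a b => a.1 < b.1)
        ∧ (∀ m ∈ ms', k + 1 ≤ m.1)
        ∧ (∀ i v, k + 1 ≤ i → ((i, v) ∈ ms' ↔ delimAt tl i = some v)) := by
      cases ms with
      | nil =>
        have hnone : delimAt tl k = none := by
          cases hdel : delimAt tl k with
          | none => rfl
          | some v =>
            have := (hmem k v (le_refl k)).2 hdel
            simp at this
        refine ⟨[], ?_, by simp, by simp, ?_⟩
        · rw [consume, hnone]; rfl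
        · intro i v hi
          simp only [List.not_mem_nil, false_iff]
          intro hd
          exact absurd ((hmem i v (by omega)).2 hd) (by simp)
      | cons m t =>
        obtain ⟨i, v⟩ := m
        have hik : k ≤ i := hge (i, v) (by simp)
        have htgt : ∀ m ∈ t, i < m.1 := (List.pairwise_cons.1 hsort).1
        rcases Nat.eq_or_lt_of_le hik with rfl | hlt
        · -- the head mark is at k: it is consumed, state becomes v
          have hd : delimAt tl k = some v := (hmem k v (le_refl k)).1 (by simp)
          refine ⟨t, ?_, (List.pairwise_cons.1 hsort).2, fun m hm => by have := htgt m hm; omega, ?_⟩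
          · rw [consume, if_pos (le_refl k), consume_of_gt t v k htgt, hd]; rfl
          · intro j w hj
            rw [← hmem j w (by omega)]
            simp only [List.mem_cons]
            constructor
            · exact Or.inr
            · rintro (hjw | hjw)
              · exfalso
                have : j = k := congrArg Prod.fst hjw
                omega
              · exact hjw
        · -- the head mark is beyond k: nothing consumed
          have hnone : delimAt tl k = none := by
            cases hdel : delimAt tl k with
            | none => rfl
            | some w =>
              have hmw := (hmem k w (le_refl k)).2 hdel
              simp only [List.mem_cons] at hmw
              rcases hmw with hmw | hmw
              · have : k = i := congrArg Prod.fst hmw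
                omega
              · have := htgt (k, w) hmw
                simp at this; omega
          refine ⟨(i, v) :: t, ?_, hsort, ?_, ?_⟩
          · rw [consume, if_neg (by omega), hnone]; rfl
          · intro m hm
            simp only [List.mem_cons] at hm
            rcases hm with rfl | hm
            · simp; omega
            · have := htgt m hm; omega
          · intro j w hj
            exact hmem j w (by omega)
    obtain ⟨ms', hcons, hsort', hge', hmem'⟩ := hstep
    cases rest with
    | nil =>
      -- last char: A never examines it, B may blank a final newline; strip hides it
      simp only [emit, hcons, scan]
      by_cases hc : a = '\n' ∧ ((delimAt tl k).getD ins) = true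
      · rw [if_pos hc]
        exact Or.inr ⟨[], by simp, by simp [hc.1]⟩
      · rw [if_neg hc]
        exact Rws_refl [a]
    | cons b t =>
      have hdropk : tl.drop k = a :: b :: t := by rw [← hdrop]
      have hdrop1 : tl.drop (k + 1) = b :: t := by
        rw [← List.tail_drop, hdropk]; rfl
      -- the scan state update is exactly the consumed delimiter
      have hins' : (if a = '/' ∧ b = '*' then true else if a = '*' ∧ b = '/' then false else ins)
          = (delimAt tl k).getD ins := by
        rw [delimAt, hdropk]
        simp only [prefix2_iff]
        split_ifs <;> rfl
      simp only [emit, hcons, scan]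
      rw [hins']
      exact Rws_cons _ (ih ms' ((delimAt tl k).getD ins) (k + 1) hdrop1.symm hsort' hge' hmem')

-- ===== VERDICT (by name: the statement is the Claim_ definition above) =====
theorem join_comments_into_oneline_spec : Claim_equal_join_comments_into_oneline := by
  intro text _
  unfold Spec_join_comments_into_oneline join_comments_into_oneline join_comments_into_oneline_alt
  have hA : loopA text.toList text.toList false 0 = scan false text.toList := by
    have := loopA_eq text.toList [] text.toList false (by simp) (by simp)
    simpa using this
  have hB := emit_eq_scan text.toList text.toList (marksOf text.toList) false 0
    (by simp) (marksOf_sorted text.toList)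
    (fun m _ => Nat.zero_le _)
    (fun i v _ => marksOf_mem text.toList i v)
  rw [hA]
  exact congrArg String.ofList (strip_Rws hB).symm
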